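-- pv_equiv track=rewrite | github.com/MimonWish/reg-policy-weekly-report-skill-lite | src/renderer.py | _find_phrase_spans
-- ===== SOURCE A (Python) =====
-- def _find_phrase_spans(text: str, phrases: list[str]) -> list[tuple[int, int]]:
--     spans: list[tuple[int, int]] = []
--     for phrase in phrases:
--         phrase = phrase.strip()
--         if not phrase:
--             continue
--         start = 0
--         while True:
--             idx = text.find(phrase, start)
--             if idx == -1:
--                 break
--             spans.append((idx, idx + len(phrase)))
--             start = idx + len(phrase)
--     return spans
-- ===== SOURCE B (Python) =====
-- def _find_phrase_spans(text: str, phrases: list[str]) -> list[tuple[int, int]]: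
--     spans: list[tuple[int, int]] = []
--     n = len(text)
--     for phrase in phrases:
--         p = phrase.strip()
--         if not p:
--             continue
--         k = len(p)
--         # stage 1: all candidate start positions, overlapping ones included
--         occ = [i for i in range(n - k + 1) if text.startswith(p, i)]
--         # stage 2: greedy left-to-right selection of non-overlapping occurrences
--         last_end = 0
--         for i in occ:
--             if i >= last_end:
--                 spans.append((i, i + k))
--                 last_end = i + k
--     return spans
-- ===== Notes on version B (the rewrite author's own statement) =====
-- stated objective: alternative
-- what changed: A's advancing `text.find(phrase, start)` cursor loop is replaced by a two-stage algorithm per phrase: first enumerate ALL candidate start positions (overlapping included) by slice comparison over range(n-k+1), then greedily keep non-overlapping occurrences left-to-right with a last_end threshold.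
import Mathlib
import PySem

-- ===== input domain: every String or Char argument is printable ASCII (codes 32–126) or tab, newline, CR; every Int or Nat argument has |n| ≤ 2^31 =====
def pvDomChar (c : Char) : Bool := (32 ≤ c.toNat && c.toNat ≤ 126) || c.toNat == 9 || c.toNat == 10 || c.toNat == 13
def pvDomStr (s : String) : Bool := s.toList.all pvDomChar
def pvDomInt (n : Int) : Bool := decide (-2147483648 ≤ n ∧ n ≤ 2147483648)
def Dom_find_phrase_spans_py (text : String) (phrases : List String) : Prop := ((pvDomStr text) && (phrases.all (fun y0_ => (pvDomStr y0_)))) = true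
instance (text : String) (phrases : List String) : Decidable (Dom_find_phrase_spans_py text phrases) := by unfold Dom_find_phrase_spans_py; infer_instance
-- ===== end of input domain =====

-- B replaces A's advancing `text.find(phrase, start)` cursor loop by a staged algorithm:
-- first enumerate ALL (overlapping) candidate start positions by slice comparison, then
-- greedily keep the non-overlapping ones with a `last_end` threshold (objective: alternative).

-- ===== PORT A =====
-- inner `while True: idx = text.find(phrase, start); …` loop of A.  fuel only bounds the
-- number of iterations (each iteration moves the cursor right by len(p) ≥ 1, so the loop
-- runs at most len(text)+1 times; it is started with fuel = len(text)+1 below).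
def pvLoopA (t p : List Char) (fuel : Nat) (start : Nat)
    (acc : List (Int × Int)) : List (Int × Int) :=
  match fuel with
  | 0 => acc
  | fuel + 1 =>
    let idx := PySem.Chars.findFrom t p (start : Int) none      -- idx = text.find(phrase, start)
    if idx = -1 then acc                                        -- if idx == -1: break
    else                                                        -- spans.append((idx, idx+len(phrase))); start = idx+len(phrase)
      pvLoopA t p fuel (idx.toNat + p.length) (acc ++ [(idx, idx + (p.length : Int))])

def find_phrase_spans_py (text : String) (phrases : List String) : List (Int × Int) :=
  phrases.foldl
    (fun spans phrase =>
      let p := PySem.Chars.strip phrase.toList                  -- phrase = phrase.strip()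
      if p = [] then spans                                      -- if not phrase: continue
      else pvLoopA text.toList p (text.toList.length + 1) 0 spans)
    []

-- ===== PORT B =====
def find_phrase_spans_py_alt (text : String) (phrases : List String) : List (Int × Int) :=
  phrases.foldl
    (fun spans phrase =>
      let p := PySem.Chars.strip phrase.toList                  -- p = phrase.strip()
      if p = [] then spans                                      -- if not p: continue
      else
        let t := text.toList
        -- occ = [i for i in range(n - k + 1) if text.startswith(p, i)]
        -- text.startswith(p, i) ported by hand as a prefix test on the tail at i
        -- (exact for the 0 ≤ i ≤ len(text) produced by the range)
        let occ := (PySem.List.pyRange 0 ((t.length : Int) - (p.length : Int) + 1) 1).filter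
          (fun i => PySem.Chars.startswith (t.drop i.toNat) p)
        -- last_end = 0; for i in occ: if i >= last_end: spans.append((i, i+k)); last_end = i+k
        (occ.foldl
          (fun (st : List (Int × Int) × Int) i =>
            if st.2 ≤ i then (st.1 ++ [(i, i + (p.length : Int))], i + (p.length : Int)) else st)
          (spans, 0)).1)
    []

-- ===== PRECONDITION & SPEC =====
def Spec_find_phrase_spans_py (text : String) (phrases : List String) (out : List (Int × Int)) : Prop := out = find_phrase_spans_py_alt text phrases
instance (text : String) (phrases : List String) (out : List (Int × Int)) : Decidable (Spec_find_phrase_spans_py text phrases out) := by unfold Spec_find_phrase_spans_py; infer_instance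

-- ===== CLAIM =====
def Claim_equal_find_phrase_spans_py : Prop := ∀ (text : String) (phrases : List String), Dom_find_phrase_spans_py text phrases → Spec_find_phrase_spans_py text phrases (find_phrase_spans_py text phrases)

-- ===== LEMMAS AND PROOFS =====

-- an infix occurrence in t.drop c is a prefix occurrence at some position ≥ c
theorem pv_infix_exists {t p : List Char} {c : Nat} (h : p <:+: t.drop c) :
    ∃ j, c ≤ j ∧ p <+: t.drop j := by
  rcases h with ⟨s1, s2, hss⟩
  refine ⟨c + s1.length, by omega, ?_⟩
  rw [← List.drop_drop, ← hss, List.append_assoc, List.drop_left]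
  exact List.prefix_append p s2

-- findFrom returns the least match position ≥ c
theorem pv_findFrom_eq (t p : List Char) (c j : Nat) (hc : c ≤ t.length) (hcj : c ≤ j)
    (hm : p <+: t.drop j) (hmin : ∀ i, c ≤ i → i < j → ¬ p <+: t.drop i) :
    PySem.Chars.findFrom t p (c : Int) none = (j : Int) := by
  have hne : PySem.Chars.findFrom t p (c : Int) none ≠ -1 := by
    rw [Ne, PySem.Chars.findFrom_natCast_eq_neg_one_iff t p c hc]
    intro hni
    have hdd : t.drop j = (t.drop c).drop (j - c) := by
      rw [List.drop_drop]; congr 1; omega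
    rw [hdd] at hm
    exact hni (hm.isInfix.trans (List.drop_suffix _ _).isInfix)
  obtain ⟨h1, h2, h3⟩ := PySem.Chars.findFrom_natCast_spec t p c hc hne
  have hr0 : (0 : Int) ≤ PySem.Chars.findFrom t p (c : Int) none := le_trans (by positivity) h1
  have hle1 : (PySem.Chars.findFrom t p (c : Int) none).toNat ≤ j := by
    by_contra hlt
    exact h3 j hcj (by omega) hm
  have hle2 : j ≤ (PySem.Chars.findFrom t p (c : Int) none).toNat := by
    by_contra hlt
    exact hmin (PySem.Chars.findFrom t p (c : Int) none).toNat (by omega) (by omega) h2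
  omega

-- the greedy step function of B's second stage
def pvStep (k : Nat) (st : List (Int × Int) × Int) (i : Int) : List (Int × Int) × Int :=
  if st.2 ≤ i then (st.1 ++ [(i, i + (k : Int))], i + (k : Int)) else st

-- A's cursor loop from cursor c equals B's greedy pass with threshold c over any list L
-- that consists of match positions and contains every match position ≥ c, in order.
theorem pv_loop_greedy (t p : List Char) (hp : p ≠ []) :
    ∀ (L : List Nat) (c fuel : Nat) (spans : List (Int × Int)),
    c ≤ t.length → t.length + 1 - c ≤ fuel →
    (∀ i ∈ L, p <+: t.drop i) →
    (∀ i, c ≤ i → p <+: t.drop i → i ∈ L) →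
    L.Pairwise (· < ·) →
    pvLoopA t p fuel c spans =
      ((L.map (Int.ofNat)).foldl (pvStep p.length) (spans, (c : Int))).1 := by
  intro L
  induction L with
  | nil =>
    intro c fuel spans hc hfuel _ hcomp _
    obtain ⟨fuel, rfl⟩ : ∃ f, fuel = f + 1 := ⟨fuel - 1, by omega⟩
    have hnone : PySem.Chars.findFrom t p (c : Int) none = -1 := by
      rw [PySem.Chars.findFrom_natCast_eq_neg_one_iff t p c hc]
      intro hinf
      obtain ⟨j, hcj, hm⟩ := pv_infix_exists hinf
      exact (List.not_mem_nil (a := j)) (hcomp j hcj hm)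
    simp [pvLoopA, hnone]
  | cons j rest ih =>
    intro c fuel spans hc hfuel hmem hcomp hpw
    have hplen : 0 < p.length := List.length_pos_of_ne_nil hp
    obtain ⟨fuel, rfl⟩ : ∃ f, fuel = f + 1 := ⟨fuel - 1, by omega⟩
    have hrest_mem : ∀ i ∈ rest, p <+: t.drop i := fun i hi => hmem i (List.mem_cons_of_mem _ hi)
    have hrest_pw : rest.Pairwise (· < ·) := hpw.of_cons
    have hjgt : ∀ i ∈ rest, j < i := fun i hi => (List.pairwise_cons.1 hpw).1 i hi
    by_cases hjc : j < c
    · -- j is below the cursor: greedy skips it, A never sees it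
      have hskip : pvStep p.length (spans, (c : Int)) (Int.ofNat j) = (spans, (c : Int)) := by
        simp only [pvStep]
        rw [if_neg]
        simp only [Int.ofNat_eq_natCast]
        exact_mod_cast by omega
      rw [List.map_cons, List.foldl_cons, hskip]
      exact ih c (fuel + 1) spans hc hfuel hrest_mem
        (fun i hci hmi => by
          rcases List.mem_cons.1 (hcomp i hci hmi) with h | h
          · omega
          · exact h)
        hrest_pw
    · -- c ≤ j: j is the least match ≥ c, A's find lands exactly on it
      rw [not_lt] at hjc
      have hmj : p <+: t.drop j := hmem j List.mem_cons_self
      have hjk : j + p.length ≤ t.length := by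
        have := hmj.length_le
        rw [List.length_drop] at this
        omega
      have hfind : PySem.Chars.findFrom t p (c : Int) none = (j : Int) := by
        refine pv_findFrom_eq t p c j hc hjc hmj ?_
        intro i hci hij hmi
        rcases List.mem_cons.1 (hcomp i hci hmi) with h | h
        · omega
        · exact absurd (hjgt i h) (by omega)
      have hstep : pvStep p.length (spans, (c : Int)) (Int.ofNat j)
          = (spans ++ [((j : Int), (j : Int) + (p.length : Int))], (j : Int) + (p.length : Int)) := by
        simp only [pvStep, Int.ofNat_eq_natCast]
        rw [if_pos (by exact_mod_cast hjc)]
      rw [List.map_cons, List.foldl_cons, hstep, pvLoopA]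
      simp only [hfind]
      rw [if_neg (by omega : ¬ (j : Int) = -1)]
      simp only [Int.toNat_natCast]
      have hcast : ((j : Int) + (p.length : Int)) = ((j + p.length : Nat) : Int) := by push_cast; ring
      rw [hcast]
      exact ih (j + p.length) fuel _ hjk (by omega) hrest_mem
        (fun i hci hmi => by
          rcases List.mem_cons.1 (hcomp i (by omega) hmi) with h | h
          · omega
          · exact h)
        hrest_pw

-- B's candidate list, recast as a filtered List.range over Nat positions
theorem pv_occ_eq (t p : List Char) :
    (PySem.List.pyRange 0 ((t.length : Int) - (p.length : Int) + 1) 1).filter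
        (fun i => PySem.Chars.startswith (t.drop i.toNat) p)
      = ((List.range ((t.length : Int) - (p.length : Int) + 1).toNat).filter
          (fun i => decide (p <+: t.drop i))).map Int.ofNat := by
  rw [PySem.List.pyRange_one]
  simp only [sub_zero, zero_add, List.filter_map]
  congr 1
  apply List.filter_congr
  intro i _
  simp only [Function.comp, Int.toNat_natCast]
  rw [Bool.eq_iff_iff, PySem.Chars.startswith_iff, decide_eq_true_iff]

-- ===== VERDICT =====
theorem find_phrase_spans_py_spec : Claim_equal_find_phrase_spans_py := by
  intro text phrases _
  unfold Spec_find_phrase_spans_py find_phrase_spans_py find_phrase_spans_py_alt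
  congr 1
  funext spans phrase
  by_cases hp : PySem.Chars.strip phrase.toList = []
  · simp [hp]
  · simp only [hp, if_false]
    set t := text.toList
    set p := PySem.Chars.strip phrase.toList
    have hplen : 0 < p.length := List.length_pos_of_ne_nil hp
    rw [pv_occ_eq t p]
    show pvLoopA t p (t.length + 1) 0 spans
      = ((((List.range _).filter _).map Int.ofNat).foldl
          (fun (st : List (Int × Int) × Int) i =>
            if st.2 ≤ i then (st.1 ++ [(i, i + (p.length : Int))], i + (p.length : Int)) else st)
          (spans, 0)).1
    have := pv_loop_greedy t p hp
      ((List.range ((t.length : Int) - (p.length : Int) + 1).toNat).filter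
        (fun i => decide (p <+: t.drop i)))
      0 (t.length + 1) spans (Nat.zero_le _) (by omega)
      (fun i hi => by simpa using (List.of_mem_filter hi))
      (fun i _ hmi => by
        have hik : i + p.length ≤ t.length := by
          have := hmi.length_le
          rw [List.length_drop] at this
          omega
        refine List.mem_filter.2 ⟨List.mem_range.2 ?_, by simpa using hmi⟩
        omega)
      ((List.pairwise_lt_range).sublist List.filter_sublist)
    simpa [pvStep] using this
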